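-- pv_equiv track=rewrite | github.com/ryrobes/larsql | rvbbit/rvbbit/sql_tools/semantic_rewriter_v2.py | _extract_infix_phrase
-- ===== SOURCE A (Python) =====
-- from typing import Optional, List, Dict, Tuple, Any
--
-- def _extract_infix_phrase(operator_pattern: str) -> Optional[str]:
--     """
--     Extract the infix operator phrase between the first }} and the next {{ or quote.
--     """
--     if "}}" not in operator_pattern:
--         return None
--     after = operator_pattern.split("}}", 1)[1].lstrip()
--     if not after:
--         return None
--
--     stop_takes = []
--     for stop in ("{{", "'", '"', "(", ")", ","):
--         idx = after.find(stop)
--         if idx != -1: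
--             stop_takes.append(idx)
--     end = min(stop_takes) if stop_takes else len(after)
--
--     segment = after[:end].strip()
--     if not segment:
--         return None
--
--     # Normalize whitespace
--     segment = " ".join(segment.split())
--     return segment
-- ===== SOURCE B (Python) =====
-- from typing import Optional
--
--
-- def _extract_infix_phrase(operator_pattern: str) -> Optional[str]:
--     """
--     Extract the infix operator phrase between the first }} and the next {{ or quote.
--     Single left-to-right scan instead of one .find() per delimiter + min().
--     """
--     if "}}" not in operator_pattern:
--         return None
--     after = operator_pattern.split("}}", 1)[1].lstrip()
--     if not after:
--         return None
--
--     end = len(after)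
--     for i in range(len(after)):
--         c = after[i]
--         if (c == "{" and i + 1 < len(after) and after[i + 1] == "{") or c in "'\"(),":
--             end = i
--             break
--
--     segment = after[:end].strip()
--     if not segment:
--         return None
--     return " ".join(segment.split())
-- ===== Notes on version B (the rewrite author's own statement) =====
-- stated objective: alternative
-- what changed: Replaces the six per-delimiter .find() passes plus min() with a single left-to-right scan that stops at the first delimiter position (with a two-char lookahead for '{{').
import Mathlib
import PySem

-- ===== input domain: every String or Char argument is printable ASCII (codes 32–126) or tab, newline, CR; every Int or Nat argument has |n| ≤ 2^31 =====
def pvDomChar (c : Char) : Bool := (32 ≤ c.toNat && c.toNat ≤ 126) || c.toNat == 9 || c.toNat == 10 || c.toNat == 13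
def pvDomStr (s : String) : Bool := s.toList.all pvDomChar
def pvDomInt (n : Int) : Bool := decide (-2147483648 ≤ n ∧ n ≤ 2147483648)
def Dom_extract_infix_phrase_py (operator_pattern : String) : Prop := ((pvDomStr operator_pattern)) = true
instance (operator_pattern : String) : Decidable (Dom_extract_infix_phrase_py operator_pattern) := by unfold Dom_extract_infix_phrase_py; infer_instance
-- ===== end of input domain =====

-- B replaces A's six per-delimiter find() passes plus min() with one left-to-right scan (two-char
-- lookahead for '{{'); same return value, no speed claim.

-- ===== PORT A =====
-- The stop tokens of A's for-loop, in order.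
def pvTokens : List (List Char) := [['{','{'], ['\''], ['"'], ['('], [')'], [',']]

-- A's "for stop in (...): idx = after.find(stop); if idx != -1: stop_takes.append(idx)" loop.
def pvStopTakes (after : List Char) : List Int :=
  pvTokens.foldl (fun acc stop =>
    let idx := PySem.Chars.find after stop
    if idx != -1 then acc ++ [idx] else acc) []

def extract_infix_phrase_py (operator_pattern : String) : Option String :=
  let s := operator_pattern.toList
  if PySem.Chars.isIn ['}','}'] s = false then none
  else
    let after := PySem.Chars.lstrip (((PySem.Chars.splitMax? s ['}','}'] 1).getD []).getD 1 [])
    if after = [] then none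
    else
      let stop_takes := pvStopTakes after
      let e : Int := (stop_takes.min?).getD (PySem.Chars.len after)
      let segment := PySem.Chars.strip (PySem.List.slice after none (some e))
      if segment = [] then none
      else some (String.ofList (PySem.Chars.join [' '] (PySem.Chars.split₀ segment)))

-- ===== PORT B =====
-- The single-character stop delimiters of B.
def pvStops : List Char := ['\'', '"', '(', ')', ',']

-- B's index loop: first position whose char starts '{{' (two-char lookahead) or is a stop char;
-- defaults to len(after).
def pvScan : List Char → Nat
  | [] => 0
  | c :: cs => if (c = '{' ∧ cs.head? = some '{') ∨ c ∈ pvStops then 0 else pvScan cs + 1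

def extract_infix_phrase_py_alt (operator_pattern : String) : Option String :=
  let s := operator_pattern.toList
  if PySem.Chars.isIn ['}','}'] s = false then none
  else
    let after := PySem.Chars.lstrip (((PySem.Chars.splitMax? s ['}','}'] 1).getD []).getD 1 [])
    if after = [] then none
    else
      let segment := PySem.Chars.strip (after.take (pvScan after))
      if segment = [] then none
      else some (String.ofList (PySem.Chars.join [' '] (PySem.Chars.split₀ segment)))

-- ===== PRECONDITION & SPEC =====
def Spec_extract_infix_phrase_py (operator_pattern : String) (out : Option String) : Prop := out = extract_infix_phrase_py_alt operator_pattern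
instance (operator_pattern : String) (out : Option String) : Decidable (Spec_extract_infix_phrase_py operator_pattern out) := by unfold Spec_extract_infix_phrase_py; infer_instance

-- ===== CLAIM (what is proved, stated in full; the proofs are below) =====
def Claim_equal_extract_infix_phrase_py : Prop := ∀ (operator_pattern : String), Dom_extract_infix_phrase_py operator_pattern → Spec_extract_infix_phrase_py operator_pattern (extract_infix_phrase_py operator_pattern)

-- ===== LEMMAS AND PROOFS =====

-- "some stop token is a prefix here": the condition both programs detect, A via find, B by scanning.
def pvHit (cs : List Char) : Prop := ∃ t ∈ pvTokens, t <+: cs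

lemma pvHit_cons (c : Char) (cs : List Char) :
    pvHit (c :: cs) ↔ ((c = '{' ∧ cs.head? = some '{') ∨ c ∈ pvStops) := by
  cases cs <;>
    simp [pvHit, pvTokens, pvStops, List.cons_prefix_cons, List.prefix_nil] <;> tauto

lemma pvScan_le (cs : List Char) : pvScan cs ≤ cs.length := by
  induction cs with
  | nil => simp [pvScan]
  | cons c cs ih =>
    simp only [pvScan, List.length_cons]
    split <;> omega

lemma pvScan_not_hit (cs : List Char) : ∀ i < pvScan cs, ¬ pvHit (cs.drop i) := by
  induction cs with
  | nil => simp [pvScan]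
  | cons c cs ih =>
    intro i hi
    simp only [pvScan] at hi
    split at hi
    · omega
    · next hcond =>
      cases i with
      | zero => simpa [pvHit_cons] using hcond
      | succ j => exact ih j (by omega)

lemma pvScan_hit (cs : List Char) (h : pvScan cs < cs.length) : pvHit (cs.drop (pvScan cs)) := by
  induction cs with
  | nil => simp at h
  | cons c cs ih =>
    by_cases hcond : (c = '{' ∧ cs.head? = some '{') ∨ c ∈ pvStops
    · simp [pvScan, hcond, pvHit_cons]
    · have h' : pvScan cs < cs.length := by
        simp [pvScan, hcond] at h
        omega
      simpa [pvScan, hcond] using ih h' 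

lemma mem_pvStopTakes (cs : List Char) (x : Int) :
    x ∈ pvStopTakes cs ↔ ∃ t ∈ pvTokens, PySem.Chars.find cs t ≠ -1 ∧ PySem.Chars.find cs t = x := by
  simp only [pvStopTakes, PySem.List.foldl_append_if, List.nil_append, List.mem_map,
    List.mem_filter]
  constructor
  · rintro ⟨t, ⟨ht, hneq⟩, rfl⟩
    exact ⟨t, ht, by simpa using hneq, rfl⟩
  · rintro ⟨t, ht, hneq, rfl⟩
    exact ⟨t, ⟨ht, by simpa using hneq⟩, rfl⟩

lemma pvHit_drop_find_toNat (cs t : List Char) (ht : t ∈ pvTokens)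
    (h : PySem.Chars.find cs t ≠ -1) : pvHit (cs.drop (PySem.Chars.find cs t).toNat) := by
  have hnn : 0 ≤ PySem.Chars.find cs t :=
    (PySem.Chars.find_nonneg_iff cs t).2 ((PySem.Chars.find_ne_neg_one_iff cs t).1 h)
  exact ⟨t, ht, (PySem.Chars.find_spec hnn).1⟩

-- Core equivalence of the two stopping rules: A's min-of-finds equals B's scan position.
lemma min_stopTakes_eq_scan (cs : List Char) :
    ((pvStopTakes cs).min?).getD (PySem.Chars.len cs) = (pvScan cs : Int) := by
  rcases hmin : (pvStopTakes cs).min? with _ | m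
  · -- no delimiter occurs at all
    have hempty : pvStopTakes cs = [] := List.min?_eq_none_iff.1 hmin
    have hnohit : ∀ i, ¬ pvHit (cs.drop i) := by
      rintro i ⟨t, ht, hpre⟩
      have hinf : t <:+: cs := by
        have := (PySem.Chars.exists_prefix_drop_iff_isIn t cs).1 ⟨i, hpre⟩
        exact (PySem.Chars.isIn_iff_infix t cs).1 this
      have hne : PySem.Chars.find cs t ≠ -1 := (PySem.Chars.find_ne_neg_one_iff cs t).2 hinf
      have : PySem.Chars.find cs t ∈ pvStopTakes cs :=
        (mem_pvStopTakes cs _).2 ⟨t, ht, hne, rfl⟩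
      simp [hempty] at this
    have hscan : pvScan cs = cs.length := by
      rcases Nat.lt_or_ge (pvScan cs) cs.length with hlt | hge
      · exact absurd (pvScan_hit cs hlt) (hnohit _)
      · exact le_antisymm (pvScan_le cs) hge
    simp [PySem.Chars.len, hscan]
  · -- m is the least find index
    have hsome := List.min?_eq_some_iff.1 hmin
    obtain ⟨hm_mem, hm_le⟩ := hsome
    obtain ⟨t, ht, hne, hfind⟩ := (mem_pvStopTakes cs m).1 hm_mem
    have hnn : 0 ≤ m := hfind ▸
      (PySem.Chars.find_nonneg_iff cs t).2 ((PySem.Chars.find_ne_neg_one_iff cs t).1 hne)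
    have hmlen : m ≤ (cs.length : Int) := hfind ▸ PySem.Chars.find_le_length cs t
    -- pvScan cs ≤ m.toNat
    have h1 : pvScan cs ≤ m.toNat := by
      by_contra hcon
      push Not at hcon
      exact pvScan_not_hit cs m.toNat hcon (hfind ▸ pvHit_drop_find_toNat cs t ht hne)
    -- m.toNat ≤ pvScan cs
    have h2 : m.toNat ≤ pvScan cs := by
      by_contra hcon
      push Not at hcon
      have hlt : pvScan cs < cs.length := by omega
      obtain ⟨t', ht', hpre'⟩ := pvScan_hit cs hlt
      have hinf' : t' <:+: cs := (PySem.Chars.isIn_iff_infix t' cs).1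
        ((PySem.Chars.exists_prefix_drop_iff_isIn t' cs).1 ⟨pvScan cs, hpre'⟩)
      have hne' : PySem.Chars.find cs t' ≠ -1 := (PySem.Chars.find_ne_neg_one_iff cs t').2 hinf'
      have hnn' : 0 ≤ PySem.Chars.find cs t' :=
        (PySem.Chars.find_nonneg_iff cs t').2 hinf'
      have hmem' : PySem.Chars.find cs t' ∈ pvStopTakes cs :=
        (mem_pvStopTakes cs _).2 ⟨t', ht', hne', rfl⟩
      have hle' : m ≤ PySem.Chars.find cs t' := hm_le _ hmem'
      have hfirst := (PySem.Chars.find_spec hnn').2 -- ∀ i < toNat, ¬ prefix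
      have : ¬ (pvScan cs < (PySem.Chars.find cs t').toNat) := fun hx => hfirst _ hx hpre'
      omega
    have : m.toNat = pvScan cs := le_antisymm h2 h1
    simp only [Option.getD_some]
    omega

lemma segment_eq (after : List Char) :
    PySem.List.slice after none (some (((pvStopTakes after).min?).getD (PySem.Chars.len after)))
      = after.take (pvScan after) := by
  rw [min_stopTakes_eq_scan]
  rw [PySem.List.slice_to after (by positivity)]
  simp

-- ===== VERDICT (by name: the statement is the Claim_ definition above) =====
theorem extract_infix_phrase_py_spec : Claim_equal_extract_infix_phrase_py := by
  intro s _
  unfold Spec_extract_infix_phrase_py extract_infix_phrase_py extract_infix_phrase_py_alt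
  simp only [segment_eq]
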